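-- pv_equiv track=rewrite | github.com/vyrjana/DearEIS | src/deareis/gui/command_palette.py | get_consecutive_letter_indices
-- ===== SOURCE A (Python) =====
-- from typing import Dict, List, Set, Tuple, Optional
--
-- def get_consecutive_letter_indices(source: str, target: str) -> List[int]:
--     indices: List[int] = []
--     letter: str
--     for letter in source:
--         index: int = -1
--         if not indices or indices[-1] >= 0:
--             index = target.find(letter, indices[-1] if indices else 0)
--         indices.append(index)
--     return indices
-- ===== SOURCE B (Python) =====
-- from bisect import bisect_left
-- from typing import List
--
-- def get_consecutive_letter_indices(source: str, target: str) -> List[int]: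
--     positions = {}
--     for i, ch in enumerate(target):
--         positions.setdefault(ch, []).append(i)
--     result: List[int] = []
--     prev = 0
--     for k, letter in enumerate(source):
--         ps = positions.get(letter)
--         if ps is not None:
--             j = bisect_left(ps, prev)
--             if j < len(ps):
--                 prev = ps[j]
--                 result.append(prev)
--                 continue
--         result.extend([-1] * (len(source) - k))
--         break
--     return result
-- ===== Notes on version B (the rewrite author's own statement) =====
-- stated objective: alternative
-- what changed: Replaces the repeated str.find scan over target with a precomputed char->sorted-positions index queried by bisect_left, and replaces A's growing indices list (whose last element drives the sticky -1) with an explicit prev cursor and early break that fills the -1 tail at once.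
import Mathlib
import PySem

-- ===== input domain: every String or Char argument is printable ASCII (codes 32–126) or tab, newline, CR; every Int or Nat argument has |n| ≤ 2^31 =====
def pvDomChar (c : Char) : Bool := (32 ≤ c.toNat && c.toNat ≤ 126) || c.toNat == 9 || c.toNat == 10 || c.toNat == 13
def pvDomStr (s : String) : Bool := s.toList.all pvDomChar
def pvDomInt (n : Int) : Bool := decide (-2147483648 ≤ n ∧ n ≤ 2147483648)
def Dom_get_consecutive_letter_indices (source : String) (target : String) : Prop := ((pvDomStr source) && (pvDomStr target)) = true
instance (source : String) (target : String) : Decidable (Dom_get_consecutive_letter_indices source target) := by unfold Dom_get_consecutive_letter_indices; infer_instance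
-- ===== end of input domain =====

-- B replaces A's repeated str.find scans with a precomputed char→positions index queried
-- by bisect_left, and replaces the list-last-element sticky -1 with an explicit cursor and
-- an early break filling the -1 tail; alternative structure, equal return value (no speed claim).

-- ===== PORT A =====
-- one iteration of A's for-loop: append target.find(letter, start) or -1
def aStep (target : String) (indices : List Int) (letter : Char) : List Int :=
  let index : Int :=
    if indices = [] ∨ 0 ≤ indices.getLastD 0 then
      PySem.Str.findFrom target (String.ofList [letter])
        (if indices = [] then 0 else indices.getLastD 0) none
    else -1
  indices ++ [index]

def get_consecutive_letter_indices (source : String) (target : String) : List Int :=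
  source.toList.foldl (aStep target) []

-- ===== PORT B =====
-- positions.setdefault(ch, []).append(i)  ≡  positions[ch] = positions.get(ch, []) + [i]
def bIndex (target : String) : PySem.Dict Char (List Int) :=
  (PySem.List.enumerate target.toList 0).foldl
    (fun d p => d.insert p.2 (d.getD p.2 [] ++ [p.1])) PySem.Dict.empty

-- the for-loop of Source B: prev cursor, bisect_left lookup, break filling the -1 tail
def bLoop (positions : PySem.Dict Char (List Int)) : Int → List Char → List Int
  | _, [] => []
  | prev, c :: rest =>
    match positions.get? c with
    | some ps =>
      let j := PySem.List.bisectLeft ps prev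
      if h : j < ps.length then ps[j] :: bLoop positions ps[j] rest
      else List.replicate (rest.length + 1) (-1)
    | none => List.replicate (rest.length + 1) (-1)

def get_consecutive_letter_indices_alt (source : String) (target : String) : List Int :=
  bLoop (bIndex target) 0 source.toList

-- ===== PRECONDITION & SPEC =====
def Spec_get_consecutive_letter_indices (source : String) (target : String) (out : List Int) : Prop := out = get_consecutive_letter_indices_alt source target
instance (source : String) (target : String) (out : List Int) : Decidable (Spec_get_consecutive_letter_indices source target out) := by unfold Spec_get_consecutive_letter_indices; infer_instance

-- ===== CLAIM (what is proved, stated in full; the proofs are below) =====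
def Claim_equal_get_consecutive_letter_indices : Prop := ∀ (source : String) (target : String), Dom_get_consecutive_letter_indices source target → Spec_get_consecutive_letter_indices source target (get_consecutive_letter_indices source target)

-- ===== LEMMAS AND PROOFS =====

-- occ c s xs = the (s-shifted) positions of c in xs, in increasing order
def occ (c : Char) : Int → List Char → List Int
  | _, [] => []
  | s, x :: xs => (if x = c then [s] else []) ++ occ c (s + 1) xs

theorem occ_nil_of_not_mem (c : Char) (s : Int) (xs : List Char) (h : c ∉ xs) :
    occ c s xs = [] := by
  induction xs generalizing s with
  | nil => rfl
  | cons x xs ih =>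
    simp only [List.mem_cons, not_or] at h
    simp [occ, h.1, Ne.symm h.1, ih _ h.2]

theorem occ_mem_iff (c : Char) (s : Int) (xs : List Char) (e : Int) :
    e ∈ occ c s xs ↔ ∃ k : Nat, e = s + k ∧ xs[k]? = some c := by
  induction xs generalizing s with
  | nil => simp [occ]
  | cons x xs ih =>
    simp only [occ, List.mem_append, ih]
    constructor
    · rintro (h | ⟨k, hk, hx⟩)
      · refine ⟨0, ?_, ?_⟩
        · split at h <;> simp_all
        · split at h <;> simp_all
      · exact ⟨k + 1, by push_cast; omega, by simpa using hx⟩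
    · rintro ⟨k, hk, hx⟩
      cases k with
      | zero =>
        left
        simp at hx
        simp [hx, hk]
      | succ k =>
        right
        exact ⟨k, by push_cast at hk ⊢; omega, by simpa using hx⟩

theorem occ_pairwise (c : Char) (s : Int) (xs : List Char) :
    (occ c s xs).Pairwise (· < ·) := by
  induction xs generalizing s with
  | nil => simp [occ]
  | cons x xs ih =>
    have hge : ∀ e ∈ occ c (s + 1) xs, s < e := by
      intro e he
      rcases (occ_mem_iff c (s + 1) xs e).1 he with ⟨k, hk, -⟩
      omega
    by_cases hx : x = c
    · simpa [occ, hx, List.pairwise_cons] using ⟨hge, ih (s + 1)⟩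
    · simpa [occ, hx] using ih (s + 1)

theorem bIndex_get? (target : String) (c : Char) :
    (bIndex target).get? c =
      if c ∈ target.toList then some (occ c 0 target.toList) else none := by
  unfold bIndex
  suffices h : ∀ (xs : List Char) (s : Int) (d : PySem.Dict Char (List Int)),
      ((PySem.List.enumerate xs s).foldl
        (fun d p => d.insert p.2 (d.getD p.2 [] ++ [p.1])) d).get? c =
      if c ∈ xs then some (d.getD c [] ++ occ c s xs) else d.get? c by
    rw [h]
    split <;> simp [PySem.Dict.getD, PySem.Dict.get?_empty]
  intro xs
  induction xs with
  | nil => simp [PySem.List.enumerate_nil]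
  | cons x xs ih =>
    intro s d
    rw [PySem.List.enumerate_cons, List.foldl_cons, ih]
    by_cases hx : x = c
    · subst hx
      have hins : (d.insert x (d.getD x [] ++ [s])).getD x [] = d.getD x [] ++ [s] := by
        simp [PySem.Dict.getD_insert]
      by_cases hc : x ∈ xs
      · simp [hc, hins, occ]
      · simp [hc, occ, occ_nil_of_not_mem x (s+1) xs hc, hins,
          PySem.Dict.get?_insert_self]
    · have h1 : (d.insert x (d.getD x [] ++ [s])).getD c [] = d.getD c [] := by
        simp [PySem.Dict.getD_insert, hx, Ne.symm hx]
      have h2 : (d.insert x (d.getD x [] ++ [s])).get? c = d.get? c :=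
        PySem.Dict.get?_insert_of_ne _ _ (fun h => hx h.symm)
      simp [occ, hx, Ne.symm hx, h1, h2, List.mem_cons]

-- [c] <+: ys iff ys starts with c
theorem singleton_prefix_iff (c : Char) (ys : List Char) :
    [c] <+: ys ↔ ys[0]? = some c := by
  cases ys with
  | nil => simp
  | cons y ys => simp [List.cons_prefix_cons, eq_comm]

theorem singleton_infix_iff (c : Char) (ys : List Char) :
    [c] <:+: ys ↔ c ∈ ys := by
  constructor
  · intro h
    exact (List.singleton_sublist).1 h.sublist
  · intro h
    rcases List.append_of_mem h with ⟨s, t, rfl⟩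
    exact ⟨s, t, by simp⟩

-- findFrom for a single char: -1 iff no occurrence at index ≥ p
theorem findFrom_eq_neg_one_iff' (t : List Char) (c : Char) (p : Nat) (hp : p ≤ t.length) :
    PySem.Chars.findFrom t [c] p = -1 ↔ ¬ ∃ i : Nat, p ≤ i ∧ t[i]? = some c := by
  rw [PySem.Chars.findFrom_natCast_eq_neg_one_iff t [c] p hp, singleton_infix_iff]
  constructor
  · intro h ⟨i, hpi, hi⟩
    exact h (by
      rw [List.mem_iff_getElem?]
      exact ⟨i - p, by rw [List.getElem?_drop]; rwa [Nat.add_sub_cancel' hpi]⟩)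
  · intro h hc
    rcases List.mem_iff_getElem?.1 hc with ⟨j, hj⟩
    rw [List.getElem?_drop] at hj
    exact h ⟨p + j, Nat.le_add_right _ _, hj⟩

theorem findFrom_found (t : List Char) (c : Char) (p : Nat) (hp : p ≤ t.length)
    (h : PySem.Chars.findFrom t [c] p ≠ -1) :
    ∃ k : Nat, PySem.Chars.findFrom t [c] p = (k : Int) ∧ p ≤ k ∧ t[k]? = some c ∧
      ∀ i : Nat, p ≤ i → i < k → t[i]? ≠ some c := by
  obtain ⟨h1, h2, h3⟩ := PySem.Chars.findFrom_natCast_spec t [c] p hp h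
  set F := PySem.Chars.findFrom t [c] ↑p with hF
  have h0 : 0 ≤ F := le_trans (by positivity) h1
  refine ⟨F.toNat, by omega, by omega, ?_, ?_⟩
  · have := (singleton_prefix_iff c (t.drop F.toNat)).1 h2
    rwa [List.getElem?_drop, Nat.add_zero] at this
  · intro i hpi hik hi
    exact h3 i hpi hik ((singleton_prefix_iff c (t.drop i)).2
      (by rwa [List.getElem?_drop, Nat.add_zero]))

-- B's bisect step equals A's findFrom step
theorem step_eq (t : List Char) (c : Char) (p : Nat) (hp : p ≤ t.length) :
    (let ps := occ c 0 t
     if h : PySem.List.bisectLeft ps (p : Int) < ps.length then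
       ps[PySem.List.bisectLeft ps (p : Int)] else (-1 : Int)) =
    PySem.Chars.findFrom t [c] (p : Int) := by
  set ps := occ c 0 t with hps
  set j := PySem.List.bisectLeft ps (p : Int) with hj
  have hsorted : ps.Pairwise (· ≤ ·) := (occ_pairwise c 0 t).imp le_of_lt
  obtain ⟨hjlen, hlt, hge⟩ := PySem.List.bisectLeft_spec ps (p : Int) hsorted
  rw [← hj] at hjlen hlt hge
  by_cases hex : ∃ i : Nat, p ≤ i ∧ t[i]? = some c
  · have hF : PySem.Chars.findFrom t [c] (p : Int) ≠ -1 := by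
      intro h; exact ((findFrom_eq_neg_one_iff' t c p hp).1 h) hex
    obtain ⟨k, hFk, hpk, hk, hmin⟩ := findFrom_found t c p hp hF
    have hkmem : (k : Int) ∈ ps := by
      rw [hps, occ_mem_iff]; exact ⟨k, by omega, hk⟩
    obtain ⟨kF, hkFlt, hpsF⟩ := List.getElem_of_mem hkmem
    have hjle : j ≤ kF := by
      by_contra hgt
      have := hlt kF hkFlt (by omega)
      rw [hpsF] at this; omega
    have hjlt : j < ps.length := lt_of_le_of_lt hjle hkFlt
    rw [dif_pos hjlt]
    -- ps[j] corresponds to an occurrence at index i ≥ p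
    have hmem : ps[j] ∈ ps := List.getElem_mem _
    obtain ⟨i, hi0, hic⟩ := (occ_mem_iff c 0 t ps[j]).1 (by rw [← hps]; exact hmem)
    have hgej : (p : Int) ≤ ps[j] := hge j hjlt le_rfl
    have hpi : p ≤ i := by omega
    have hki : k ≤ i := by
      by_contra hlt'
      exact hmin i hpi (by omega) hic
    have hle2 : ps[j] ≤ ps[kF] := by
      rcases lt_or_eq_of_le hjle with h' | h'
      · exact ((List.pairwise_iff_getElem.1 hsorted) j kF hjlt hkFlt h')
      · simp [h']
    rw [hpsF] at hle2
    have hfin : ps[j] = (k : Int) := le_antisymm hle2 (by omega)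
    rw [hFk]
    exact hfin
  · have hF : PySem.Chars.findFrom t [c] (p : Int) = -1 :=
      (findFrom_eq_neg_one_iff' t c p hp).2 hex
    have hjlen' : ¬ j < ps.length := by
      intro hjlt
      have hmem : ps[j] ∈ ps := List.getElem_mem _
      obtain ⟨i, hi0, hic⟩ := (occ_mem_iff c 0 t ps[j]).1 (by rw [← hps]; exact hmem)
      have hgej : (p : Int) ≤ ps[j] := hge j hjlt le_rfl
      exact hex ⟨i, by omega, hic⟩
    rw [dif_neg hjlen', hF]

-- once -1 has been appended, A keeps appending -1
theorem dead_loop (target : String) (cs : List Char) :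
    ∀ acc : List Int, acc.getLastD 0 < 0 →
      cs.foldl (aStep target) acc = acc ++ List.replicate cs.length (-1) := by
  induction cs with
  | nil => simp
  | cons c cs ih =>
    intro acc hacc
    have hne : acc ≠ [] := by intro h; simp [h] at hacc
    have : aStep target acc c = acc ++ [-1] := by
      unfold aStep
      simp only [hne, false_or, if_neg (by omega : ¬ (0:Int) ≤ acc.getLastD 0)]
    rw [List.foldl_cons, this, ih (acc ++ [-1]) (by simp [List.getLastD_concat])]
    simp [List.replicate_succ]

theorem loop_eq (target : String) (cs : List Char) :
    ∀ (p : Nat) (acc : List Int), p ≤ target.toList.length →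
      ((acc ≠ [] ∧ acc.getLastD 0 = (p : Int)) ∨ (acc = [] ∧ p = 0)) →
      cs.foldl (aStep target) acc = acc ++ bLoop (bIndex target) (p : Int) cs := by
  induction cs with
  | nil => intro p acc _ _; simp [bLoop]
  | cons c cs ih =>
    intro p acc hp hacc
    have hstep : aStep target acc c =
        acc ++ [PySem.Chars.findFrom target.toList [c] (p : Int)] := by
      unfold aStep
      rcases hacc with ⟨hne, hlast⟩ | ⟨hnil, hp0⟩
      · simp [hne, PySem.Str.findFrom_eq, ← List.getLastD_eq_getLast?, hlast, Int.natCast_nonneg]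
      · simp [hnil, hp0, PySem.Str.findFrom_eq]
    rw [List.foldl_cons, hstep]
    by_cases hc : c ∈ target.toList
    · have hget : (bIndex target).get? c = some (occ c 0 target.toList) := by
        rw [bIndex_get?]; simp [hc]
      have hstepeq := step_eq target.toList c p hp
      simp only at hstepeq
      by_cases hj : PySem.List.bisectLeft (occ c 0 target.toList) (p : Int) <
          (occ c 0 target.toList).length
      · have hval : (occ c 0 target.toList)[PySem.List.bisectLeft (occ c 0 target.toList) (p : Int)] =
            PySem.Chars.findFrom target.toList [c] (p : Int) := by
          rw [← hstepeq, dif_pos hj]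
        obtain ⟨k, hk0, hkc⟩ := (occ_mem_iff c 0 target.toList _).1
          (List.getElem_mem hj)
        have hklt : k < target.toList.length :=
          (List.getElem?_eq_some_iff.1 hkc).1
        have hFk : PySem.Chars.findFrom target.toList [c] (p : Int) = (k : Int) := by
          rw [← hval, hk0]; ring
        have ihk := ih k (acc ++ [(k : Int)]) (le_of_lt hklt)
          (Or.inl ⟨by simp, by simp⟩)
        rw [hFk, ihk]
        have hbl : bLoop (bIndex target) (p : Int) (c :: cs) =
            (k : Int) :: bLoop (bIndex target) (k : Int) cs := by
          simp only [bLoop, hget, dif_pos hj]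
          rw [show (occ c 0 target.toList)[PySem.List.bisectLeft (occ c 0 target.toList) (p : Int)] = (k : Int) by rw [hk0]; ring]
        rw [hbl]
        simp
      · have hF : PySem.Chars.findFrom target.toList [c] (p : Int) = -1 := by
          rw [← hstepeq, dif_neg hj]
        rw [hF, dead_loop target cs (acc ++ [-1]) (by simp)]
        have hbl : bLoop (bIndex target) (p : Int) (c :: cs) =
            List.replicate (cs.length + 1) (-1) := by
          simp only [bLoop, hget, dif_neg hj]
        rw [hbl, List.replicate_succ]
        simp
    · have hget : (bIndex target).get? c = none := by
        rw [bIndex_get?]; simp [hc]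
      have hF : PySem.Chars.findFrom target.toList [c] (p : Int) = -1 := by
        apply (findFrom_eq_neg_one_iff' target.toList c p hp).2
        rintro ⟨i, -, hi⟩
        exact hc (List.mem_of_getElem? hi)
      rw [hF, dead_loop target cs (acc ++ [-1]) (by simp)]
      have hbl : bLoop (bIndex target) (p : Int) (c :: cs) =
          List.replicate (cs.length + 1) (-1) := by
        simp only [bLoop, hget]
      rw [hbl, List.replicate_succ]
      simp

-- ===== VERDICT (by name: the statement is the Claim_ definition above) =====
theorem get_consecutive_letter_indices_spec : Claim_equal_get_consecutive_letter_indices := by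
  intro source target _
  unfold Spec_get_consecutive_letter_indices get_consecutive_letter_indices
    get_consecutive_letter_indices_alt
  have := loop_eq target source.toList 0 [] (Nat.zero_le _) (Or.inr ⟨rfl, rfl⟩)
  simpa using this
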